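-- pv_equiv track=rewrite | github.com/dmcskim/weightedSmithWaterman | weightedSmithWaterman.py | alignment_string
-- ===== SOURCE A (Python) =====
-- def alignment_string(aligned_seq1, aligned_seq2):
--     '''Construct a special string showing identities, gaps, and mismatches.
--
--     This string is printed between the two aligned sequences and shows the
--     identities (|), gaps (-), and mismatches (:). As the string is constructed,
--     it also counts number of identities, gaps, and mismatches and returns the
--     counts along with the alignment string.
--
--     AAGGATGCCTCAAATCGATCT-TTTTCTTGG-
--     ::||::::::||:|::::::: |:  :||:|   <-- alignment string
--     CTGGTACTTGCAGAGAAGGGGGTA--ATTTGG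
--     '''
--     # Build the string as a list of characters to avoid costly string
--     # concatenation.
--     idents, gaps, mismatches = 0, 0, 0
--     alignment_string = []
--     for base1, base2 in zip(aligned_seq1, aligned_seq2):
--         if base1 == base2:
--             alignment_string.append('|')
--             idents += 1
--         elif '-' in (base1, base2):
--             alignment_string.append(' ')
--             gaps += 1
--         else:
--             alignment_string.append(':')
--             mismatches += 1
--
--     return ''.join(alignment_string), idents, gaps, mismatches
-- ===== SOURCE B (Python) =====
-- def alignment_string(aligned_seq1, aligned_seq2):
--     # Mask-overwrite scheme: start with every position marked as a mismatch,
--     # overwrite gap positions, then overwrite identity positions (identity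
--     # wins over gap, matching the intended priority).  Counts are derived
--     # afterwards, with mismatches obtained arithmetically as the remainder.
--     n = min(len(aligned_seq1), len(aligned_seq2))
--     marks = [':'] * n
--     for i in range(n):
--         if aligned_seq1[i] == '-' or aligned_seq2[i] == '-':
--             marks[i] = ' '
--     for i in range(n):
--         if aligned_seq1[i] == aligned_seq2[i]:
--             marks[i] = '|'
--     s = ''.join(marks)
--     idents = s.count('|')
--     gaps = s.count(' ')
--     return s, idents, gaps, n - idents - gaps
-- ===== Notes on version B (the rewrite author's own statement) =====
-- stated objective: alternative
-- what changed: B replaces A's single classify-each-pair loop with a mask-overwrite scheme: it initialises every position as a mismatch ':', overwrites gap positions with ' ' in one indexed pass, overwrites identity positions with '|' in a second pass (identity taking priority by overwriting last), then derives idents and gaps by counting the finished string and mismatches arithmetically as n - idents - gaps.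
import Mathlib
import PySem

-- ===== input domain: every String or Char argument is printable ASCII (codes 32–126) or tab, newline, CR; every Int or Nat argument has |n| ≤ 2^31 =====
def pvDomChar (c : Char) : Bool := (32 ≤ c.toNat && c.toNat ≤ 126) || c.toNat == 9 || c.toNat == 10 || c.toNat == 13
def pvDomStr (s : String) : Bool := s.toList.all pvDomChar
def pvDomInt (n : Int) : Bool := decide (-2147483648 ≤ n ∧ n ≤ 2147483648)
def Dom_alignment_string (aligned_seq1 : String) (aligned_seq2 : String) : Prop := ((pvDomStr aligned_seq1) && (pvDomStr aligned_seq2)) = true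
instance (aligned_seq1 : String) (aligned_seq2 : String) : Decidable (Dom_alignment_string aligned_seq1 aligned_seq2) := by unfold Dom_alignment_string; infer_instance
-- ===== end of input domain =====

-- B replaces A's classify-each-pair loop by a mask-overwrite scheme (init all ':', overwrite gaps, then identities; mismatches derived arithmetically); objective: alternative.

-- ===== PORT A =====
-- A: one loop over zip, maintaining a char list and three running counters.
def alignment_string (aligned_seq1 : String) (aligned_seq2 : String) : String × Int × Int × Int :=
  let st := (aligned_seq1.toList.zip aligned_seq2.toList).foldl
    (fun (st : List Char × Int × Int × Int) p =>
      if p.1 == p.2 then (st.1 ++ ['|'], st.2.1 + 1, st.2.2.1, st.2.2.2)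
      else if p.1 == '-' || p.2 == '-' then (st.1 ++ [' '], st.2.1, st.2.2.1 + 1, st.2.2.2)
      else (st.1 ++ [':'], st.2.1, st.2.2.1, st.2.2.2 + 1))
    ([], 0, 0, 0)
  (String.ofList st.1, st.2)

-- ===== PORT B =====
-- B: n = min length; marks = [':'] * n; pass 1 overwrites gap positions with ' ';
-- pass 2 overwrites identity positions with '|'; counts derived from the finished
-- string, mismatches as n - idents - gaps.
-- seq[i] for 0 ≤ i < length is ported exactly by List.getD i ' ' (always in range here).
def alignment_string_alt (aligned_seq1 : String) (aligned_seq2 : String) : String × Int × Int × Int :=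
  let l1 := aligned_seq1.toList
  let l2 := aligned_seq2.toList
  let n := min l1.length l2.length
  let marks0 := List.replicate n ':'
  let marks1 := (List.range n).foldl
    (fun (m : List Char) i => if l1.getD i ' ' == '-' || l2.getD i ' ' == '-' then m.set i ' ' else m) marks0
  let marks := (List.range n).foldl
    (fun (m : List Char) i => if l1.getD i ' ' == l2.getD i ' ' then m.set i '|' else m) marks1
  let s := String.ofList marks
  let idents : Int := marks.count '|'
  let gaps : Int := marks.count ' '
  (s, idents, gaps, (n : Int) - idents - gaps)

-- ===== PRECONDITION & SPEC =====
def Spec_alignment_string (aligned_seq1 : String) (aligned_seq2 : String) (out : String × Int × Int × Int) : Prop := out = alignment_string_alt aligned_seq1 aligned_seq2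
instance (aligned_seq1 : String) (aligned_seq2 : String) (out : String × Int × Int × Int) : Decidable (Spec_alignment_string aligned_seq1 aligned_seq2 out) := by unfold Spec_alignment_string; infer_instance

-- ===== CLAIM (what is proved, stated in full; the proofs are below) =====
def Claim_equal_alignment_string : Prop := ∀ (aligned_seq1 : String) (aligned_seq2 : String), Dom_alignment_string aligned_seq1 aligned_seq2 → Spec_alignment_string aligned_seq1 aligned_seq2 (alignment_string aligned_seq1 aligned_seq2)

-- ===== LEMMAS AND PROOFS =====

-- per-pair classification (A's branch structure, used only in the proofs)
def pvClassify (p : Char × Char) : Char :=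
  if p.1 == p.2 then '|' else if p.1 == '-' || p.2 == '-' then ' ' else ':'

-- A's loop, run from any start state, appends the classified chars and adds per-class counts.
theorem pvLoop_invariant (l : List (Char × Char)) (acc : List Char) (i g m : Int) :
    l.foldl
      (fun (st : List Char × Int × Int × Int) p =>
        if p.1 == p.2 then (st.1 ++ ['|'], st.2.1 + 1, st.2.2.1, st.2.2.2)
        else if p.1 == '-' || p.2 == '-' then (st.1 ++ [' '], st.2.1, st.2.2.1 + 1, st.2.2.2)
        else (st.1 ++ [':'], st.2.1, st.2.2.1, st.2.2.2 + 1))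
      (acc, i, g, m)
    = (acc ++ l.map pvClassify,
       i + ((l.map pvClassify).count '|' : Int),
       g + ((l.map pvClassify).count ' ' : Int),
       m + ((l.map pvClassify).count ':' : Int)) := by
  induction l generalizing acc i g m with
  | nil => simp
  | cons p t ih =>
      simp only [List.foldl_cons, List.map_cons]
      by_cases h1 : p.1 == p.2
      · simp only [h1, if_pos, ih, pvClassify, List.count_cons, List.append_assoc,
          List.singleton_append]
        simp only [Prod.mk.injEq]
        norm_num
        omega
      · by_cases h2 : p.1 == '-' || p.2 == '-'
        · simp only [h1, h2, if_neg, if_pos, Bool.false_eq_true, not_false_iff, ih, pvClassify,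
            List.count_cons, List.append_assoc, List.singleton_append]
          simp only [Prod.mk.injEq]
          norm_num
          omega
        · simp only [h1, h2, if_neg, Bool.false_eq_true, not_false_iff, ih, pvClassify,
            List.count_cons, List.append_assoc, List.singleton_append]
          simp only [Prod.mk.injEq]
          norm_num
          omega

-- a conditional-set pass preserves the length
theorem pvSetPass_length (l : List Nat) (f : Nat → Bool) (c : Char) (m : List Char) :
    (l.foldl (fun (m : List Char) i => if f i then m.set i c else m) m).length = m.length := by
  induction l generalizing m with
  | nil => rfl
  | cons i t ih =>
      simp only [List.foldl_cons]
      by_cases h : f i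
      · simp [h, ih]
      · simp [h, ih]

-- element j of a conditional-set pass
theorem pvSetPass_getElem? (l : List Nat) (f : Nat → Bool) (c : Char) (m : List Char) (j : Nat) :
    (l.foldl (fun (m : List Char) i => if f i then m.set i c else m) m)[j]? =
      if j ∈ l ∧ f j then (m.set j c)[j]? else m[j]? := by
  induction l generalizing m with
  | nil => simp
  | cons i t ih =>
      simp only [List.foldl_cons]
      by_cases h : f i
      · simp only [h, if_pos]
        rw [ih]
        by_cases hij : i = j
        · subst hij
          by_cases hm : i ∈ t ∧ f i
          · rw [if_pos hm, if_pos ⟨by simp, h⟩]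
            simp [List.getElem?_set]
          · rw [if_neg hm, if_pos ⟨by simp, h⟩]
        · by_cases hm : j ∈ t ∧ f j
          · rw [if_pos hm, if_pos ⟨List.mem_cons_of_mem _ hm.1, hm.2⟩]
            simp [List.getElem?_set]
          · rw [if_neg hm]
            by_cases hj : j ∈ i :: t ∧ f j
            · rcases hj with ⟨hj1, hj2⟩
              rcases List.mem_cons.mp hj1 with h1 | h1
              · exact absurd h1.symm hij
              · exact absurd ⟨h1, hj2⟩ hm
            · simp only [hj, if_neg, not_false_iff]
              simp [hij]
      · simp only [h, if_neg, Bool.false_eq_true, not_false_iff]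
        rw [ih]
        by_cases hm : j ∈ t ∧ f j
        · simp only [hm]
          have : (j ∈ i :: t ∧ f j) := ⟨List.mem_cons_of_mem _ hm.1, hm.2⟩
          simp [this]
        · simp only [hm, if_neg, not_false_iff]
          by_cases hj : j ∈ i :: t ∧ f j
          · rcases hj with ⟨hj1, hj2⟩
            rcases List.mem_cons.mp hj1 with h1 | h1
            · subst h1; exact absurd hj2 (by simpa using h)
            · exact absurd ⟨h1, hj2⟩ hm
          · rw [if_neg hj]

-- length is split among the three marker characters
theorem pvCount_split (l : List (Char × Char)) :
    ((l.map pvClassify).count '|' + (l.map pvClassify).count ' ' + (l.map pvClassify).count ':')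
      = l.length := by
  induction l with
  | nil => simp
  | cons p t ih =>
      simp only [List.map_cons, List.count_cons, List.length_cons, pvClassify]
      by_cases h1 : p.1 == p.2
      · simp [h1]; omega
      · by_cases h2 : p.1 == '-' || p.2 == '-'
        · simp [h1, h2]; omega
        · simp [h1, h2]; omega

-- B's two overwrite passes produce exactly the classified string
theorem pvMarks_eq (l1 l2 : List Char) :
    ((List.range (min l1.length l2.length)).foldl
      (fun (m : List Char) i => if l1.getD i ' ' == l2.getD i ' ' then m.set i '|' else m)
      ((List.range (min l1.length l2.length)).foldl
        (fun (m : List Char) i => if l1.getD i ' ' == '-' || l2.getD i ' ' == '-' then m.set i ' ' else m)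
        (List.replicate (min l1.length l2.length) ':')))
    = (l1.zip l2).map pvClassify := by
  set n := min l1.length l2.length with hn
  apply List.ext_getElem?
  intro j
  rw [pvSetPass_getElem?, pvSetPass_getElem?]
  have hlen1 : ((List.range n).foldl
      (fun (m : List Char) i => if l1.getD i ' ' == '-' || l2.getD i ' ' == '-' then m.set i ' ' else m)
      (List.replicate n ':')).length = n := by
    rw [pvSetPass_length, List.length_replicate]
  have hzlen : ((l1.zip l2).map pvClassify).length = n := by
    simp [List.length_zip, hn]
  by_cases hj : j < n
  · have hj1 : j < l1.length := lt_of_lt_of_le hj (by omega)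
    have hj2 : j < l2.length := lt_of_lt_of_le hj (by omega)
    have hget1 : l1.getD j ' ' = l1[j] := List.getD_eq_getElem _ _ hj1
    have hget2 : l2.getD j ' ' = l2[j] := List.getD_eq_getElem _ _ hj2
    have hrhs : ((l1.zip l2).map pvClassify)[j]? = some (pvClassify (l1[j], l2[j])) := by
      rw [List.getElem?_eq_getElem (by omega)]
      simp [List.getElem_zip]
    rw [hrhs]
    by_cases heq : l1.getD j ' ' == l2.getD j ' '
    · have : (j ∈ List.range n ∧ (l1.getD j ' ' == l2.getD j ' ') = true) := ⟨List.mem_range.mpr hj, heq⟩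
      rw [if_pos this, List.getElem?_set_self (by omega)]
      have : pvClassify (l1[j], l2[j]) = '|' := by
        simp only [pvClassify]
        rw [if_pos (by rw [← hget1, ← hget2]; exact heq)]
      rw [this]
    · rw [if_neg (by intro h; exact heq h.2)]
      by_cases hdash : l1.getD j ' ' == '-' || l2.getD j ' ' == '-'
      · have : (j ∈ List.range n ∧ (l1.getD j ' ' == '-' || l2.getD j ' ' == '-') = true) :=
          ⟨List.mem_range.mpr hj, hdash⟩
        rw [if_pos this, List.getElem?_set_self (by simp [hj])]
        have : pvClassify (l1[j], l2[j]) = ' ' := by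
          simp only [pvClassify]
          rw [if_neg (by rw [hget1, hget2] at heq; exact heq),
              if_pos (by rw [← hget1, ← hget2]; exact hdash)]
        rw [this]
      · rw [if_neg (by intro h; exact hdash h.2)]
        rw [List.getElem?_eq_getElem (by simp [hj])]
        have : pvClassify (l1[j], l2[j]) = ':' := by
          simp only [pvClassify]
          rw [if_neg (by rw [hget1, hget2] at heq; exact heq),
              if_neg (by rw [hget1, hget2] at hdash; exact hdash)]
        simp [this]
  · have h1 : ¬ (j ∈ List.range n ∧ (l1.getD j ' ' == l2.getD j ' ') = true) := by
      intro h; exact hj (List.mem_range.mp h.1)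
    have h2 : ¬ (j ∈ List.range n ∧ (l1.getD j ' ' == '-' || l2.getD j ' ' == '-') = true) := by
      intro h; exact hj (List.mem_range.mp h.1)
    rw [if_neg h1, if_neg h2,
        List.getElem?_eq_none (by simp; omega),
        List.getElem?_eq_none (by simp [List.length_zip, ← hn]; omega)]

-- ===== VERDICT (by name: the statement is the Claim_ definition above) =====
theorem alignment_string_spec : Claim_equal_alignment_string := by
  intro s1 s2 _
  unfold Spec_alignment_string alignment_string alignment_string_alt
  simp only [pvLoop_invariant, pvMarks_eq, List.nil_append, zero_add]
  have hsplit := pvCount_split (s1.toList.zip s2.toList)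
  have hzlen : (s1.toList.zip s2.toList).length = min s1.toList.length s2.toList.length :=
    List.length_zip
  simp only [Prod.mk.injEq]
  refine ⟨trivial, trivial, trivial, ?_⟩
  push_cast
  omega
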